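-- pv_equiv track=rewrite | github.com/ScienceAndCats/GSU_paper_1 | test2.py | find_prefixes_in_row
-- ===== SOURCE A (Python) =====
-- PREFIXES = [
--     "PA01:",
--     "lkd16:",
--     "luz19:",
--     "14one:",
--     "DH5alpha:",
--     "MG1655:",
--     "pTNS2:"
-- ]
--
-- def find_prefixes_in_row(contig_genes_str):
--     """
--     Given a string like:
--        "DH5alpha:C1467_RS02470, DH5alpha:C1467_RS06230, MG1655:rrlC"
--     Returns a set of distinct prefixes found, out of the predefined list.
--     """
--     genes = [g.strip() for g in contig_genes_str.split(",")]
--     found = set()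
--     for gene in genes:
--         for pfx in PREFIXES:
--             if gene.startswith(pfx):
--                 found.add(pfx)
--     return found
-- ===== SOURCE B (Python) =====
-- PREFIXES = [
--     "PA01:",
--     "lkd16:",
--     "luz19:",
--     "14one:",
--     "DH5alpha:",
--     "MG1655:",
--     "pTNS2:"
-- ]
--
-- _PREFIX_SET = frozenset(PREFIXES)
--
-- def find_prefixes_in_row(contig_genes_str):
--     found = set()
--     for part in contig_genes_str.split(","):
--         gene = part.strip()
--         i = gene.find(":")
--         if i != -1:
--             key = gene[:i + 1]
--             if key in _PREFIX_SET:
--                 found.add(key)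
--     return found
-- ===== Notes on version B (the rewrite author's own statement) =====
-- stated objective: idiomatic
-- what changed: Instead of testing every predefined prefix against every gene, B extracts each gene's candidate key (the substring up to and including the first colon) and checks that single key against a prefix set, dropping the inner prefix loop.
import Mathlib
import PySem

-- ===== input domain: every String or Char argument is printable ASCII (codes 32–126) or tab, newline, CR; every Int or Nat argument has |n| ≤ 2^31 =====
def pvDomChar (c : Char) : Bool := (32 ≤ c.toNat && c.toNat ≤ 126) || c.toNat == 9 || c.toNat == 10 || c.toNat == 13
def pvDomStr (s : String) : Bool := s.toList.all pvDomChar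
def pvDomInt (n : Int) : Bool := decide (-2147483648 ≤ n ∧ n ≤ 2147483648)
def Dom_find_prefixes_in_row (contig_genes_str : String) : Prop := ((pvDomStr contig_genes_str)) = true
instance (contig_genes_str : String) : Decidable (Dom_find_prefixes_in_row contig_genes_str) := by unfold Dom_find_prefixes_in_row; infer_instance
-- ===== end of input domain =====

-- B replaces A's inner loop over all prefixes by a single lookup of each gene's
-- first-colon-inclusive head in a prefix set (idiomatic; same return value).

-- ===== PORT A =====
def PREFIXES : List String :=
  ["PA01:", "lkd16:", "luz19:", "14one:", "DH5alpha:", "MG1655:", "pTNS2:"]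

def find_prefixes_in_row (contig_genes_str : String) : List String :=
  let genes := ((PySem.Str.split? contig_genes_str ",").getD []).map
    (fun g => PySem.Str.strip g)
  genes.foldl
    (fun found gene =>
      PREFIXES.foldl
        (fun found pfx =>
          if PySem.Str.startswith gene pfx then PySem.Set.add found pfx else found)
        found)
    PySem.Set.empty

-- ===== PORT B =====
def pfxSetB : PySem.Set String :=
  PySem.Set.ofList ["PA01:", "lkd16:", "luz19:", "14one:", "DH5alpha:", "MG1655:", "pTNS2:"]

def find_prefixes_in_row_alt (contig_genes_str : String) : List String :=
  ((PySem.Str.split? contig_genes_str ",").getD []).foldl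
    (fun found part =>
      let gene := PySem.Str.strip part
      let i := PySem.Str.find gene ":"
      if i ≠ -1 then
        let key := PySem.Str.slice gene none (some (i + 1))
        if PySem.Set.contains pfxSetB key then PySem.Set.add found key else found
      else found)
    PySem.Set.empty

-- ===== PRECONDITION & SPEC =====
def Spec_find_prefixes_in_row (contig_genes_str : String) (out : List String) : Prop := out = find_prefixes_in_row_alt contig_genes_str
instance (contig_genes_str : String) (out : List String) : Decidable (Spec_find_prefixes_in_row contig_genes_str out) := by unfold Spec_find_prefixes_in_row; infer_instance

-- ===== CLAIM (what is proved, stated in full; the proofs are below) =====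
def Claim_equal_find_prefixes_in_row : Prop := ∀ (contig_genes_str : String), Dom_find_prefixes_in_row contig_genes_str → Spec_find_prefixes_in_row contig_genes_str (find_prefixes_in_row contig_genes_str)

-- ===== LEMMAS AND PROOFS =====

lemma singleton_prefix_iff (c : Char) (l : List Char) : [c] <+: l ↔ l.head? = some c := by
  constructor
  · rintro ⟨t, rfl⟩; rfl
  · intro h
    cases l with
    | nil => simp at h
    | cons a t => simp at h; exact ⟨t, by simp [h]⟩

lemma set_add_idem (s : PySem.Set String) (x : String) :
    PySem.Set.add (PySem.Set.add s x) x = PySem.Set.add s x := by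
  simp [PySem.Set.add, PySem.Set.contains]
  split_ifs with h <;> simp [h]

-- the first ':' of g sits at index n, earlier chars are not ':'
lemma find_colon_spec (g : List Char) (h : PySem.Chars.find g [':'] ≠ -1) :
    g[(PySem.Chars.find g [':']).toNat]? = some ':' ∧
    ∀ j < (PySem.Chars.find g [':']).toNat, g[j]? ≠ some ':' := by
  have hspec := PySem.Chars.findFrom_natCast_spec g [':'] 0 (Nat.zero_le _)
    (by simpa [PySem.Chars.findFrom_zero] using h)
  simp only [Nat.cast_zero, PySem.Chars.findFrom_zero] at hspec
  obtain ⟨-, hpre, hmin⟩ := hspec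
  refine ⟨?_, ?_⟩
  · rw [← List.head?_drop]; exact (singleton_prefix_iff _ _).mp hpre
  · intro j hj hc
    exact hmin j (Nat.zero_le _) hj ((singleton_prefix_iff _ _).mpr (by rw [List.head?_drop]; exact hc))

-- startswith by a one-colon prefix is the same as "the head up to the first colon equals it"
lemma startswith_colon_key (g q : List Char) (hq : ':' ∉ q)
    (h : PySem.Chars.find g [':'] ≠ -1) :
    (PySem.Chars.startswith g (q ++ [':']) = true ↔
      g.take ((PySem.Chars.find g [':']).toNat + 1) = q ++ [':']) := by
  set n := (PySem.Chars.find g [':']).toNat with hn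
  obtain ⟨hat, hbefore⟩ := find_colon_spec g h
  constructor
  · intro hsw
    obtain ⟨r, hr⟩ := (PySem.Chars.startswith_iff g (q ++ [':'])).mp hsw
    have hg : g = q ++ ':' :: r := by rw [← hr]; simp
    have hql : g[q.length]? = some ':' := by
      rw [hg]; simp
    have hne : n = q.length := by
      rcases Nat.lt_trichotomy n q.length with hlt | heq | hgt
      · exfalso
        have : g[n]? = q[n]? := by rw [hg]; rw [List.getElem?_append_left hlt]
        rw [this] at hat
        exact hq (List.mem_of_getElem? hat)
      · exact heq
      · exact absurd hql (hbefore q.length hgt)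
    rw [hne, hg, List.take_length_add_append 1]
    simp
  · intro htake
    have hlen : n < g.length := by
      by_contra hge
      rw [Nat.not_lt] at hge
      rw [List.getElem?_eq_none hge] at hat
      simp at hat
    apply (PySem.Chars.startswith_iff g (q ++ [':'])).mpr
    rw [← htake]
    exact List.take_prefix _ g

lemma startswith_false_of_no_colon (g q : List Char)
    (h : PySem.Chars.find g [':'] = -1) :
    PySem.Chars.startswith g (q ++ [':']) = false := by
  have hni := (PySem.Chars.find_eq_neg_one_iff g [':']).mp h
  by_contra hne
  rw [Bool.not_eq_false] at hne
  obtain ⟨r, hr⟩ := (PySem.Chars.startswith_iff g (q ++ [':'])).mp hne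
  exact hni ⟨q, r, by rw [← hr]⟩

-- every predefined prefix is a one-colon word: some colon-free q followed by ':'
lemma prefixes_shape : ∀ p ∈ PREFIXES, ∃ q : List Char, p.toList = q ++ [':'] ∧ ':' ∉ q := by
  intro p hp
  simp only [PREFIXES, List.mem_cons, List.not_mem_nil, or_false] at hp
  rcases hp with rfl | rfl | rfl | rfl | rfl | rfl | rfl
  · exact ⟨['P','A','0','1'], by decide, by decide⟩
  · exact ⟨['l','k','d','1','6'], by decide, by decide⟩
  · exact ⟨['l','u','z','1','9'], by decide, by decide⟩
  · exact ⟨['1','4','o','n','e'], by decide, by decide⟩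
  · exact ⟨['D','H','5','a','l','p','h','a'], by decide, by decide⟩
  · exact ⟨['M','G','1','6','5','5'], by decide, by decide⟩
  · exact ⟨['p','T','N','S','2'], by decide, by decide⟩

-- per-gene: A's inner loop over a list of one-colon prefixes equals B's single lookup
lemma inner_fold_eq (gene : String) (ps : List String)
    (hps : ∀ p ∈ ps, ∃ q : List Char, p.toList = q ++ [':'] ∧ ':' ∉ q)
    (found : PySem.Set String) :
    ps.foldl
      (fun found pfx =>
        if PySem.Str.startswith gene pfx then PySem.Set.add found pfx else found)
      found
    = (if PySem.Str.find gene ":" ≠ -1 then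
        (if List.contains ps (PySem.Str.slice gene none (some (PySem.Str.find gene ":" + 1)))
          then PySem.Set.add found (PySem.Str.slice gene none (some (PySem.Str.find gene ":" + 1)))
          else found)
      else found) := by
  induction ps generalizing found with
  | nil => simp [List.foldl]
  | cons p ps ih =>
    obtain ⟨q, hpq, hq⟩ := hps p List.mem_cons_self
    have hps' : ∀ p' ∈ ps, ∃ q : List Char, p'.toList = q ++ [':'] ∧ ':' ∉ q :=
      fun p' hp' => hps p' (List.mem_cons_of_mem _ hp')
    have hcol : (":" : String).toList = [':'] := rfl
    have hfind : PySem.Str.find gene ":" = PySem.Chars.find gene.toList [':'] := by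
      rw [PySem.Str.find_eq, hcol]
    by_cases hf : PySem.Str.find gene ":" = -1
    · have hsw : PySem.Str.startswith gene p = false := by
        rw [PySem.Str.startswith_eq, hpq]
        exact startswith_false_of_no_colon _ q (by rw [← hfind]; exact hf)
      simp only [List.foldl_cons, hsw, Bool.false_eq_true, if_false]
      rw [ih hps' found, if_neg (by simp only [hf]; simp), if_neg (by simp only [hf]; simp)]
    · have hf' : PySem.Chars.find gene.toList [':'] ≠ -1 := by rw [← hfind]; exact hf
      have h1 := PySem.Chars.neg_one_le_find gene.toList [':']
      have hipos : (0:Int) ≤ PySem.Str.find gene ":" := by rw [hfind]; omega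
      have hkeyl : (PySem.Str.slice gene none (some (PySem.Str.find gene ":" + 1))).toList
          = gene.toList.take ((PySem.Chars.find gene.toList [':']).toNat + 1) := by
        rw [PySem.Str.toList_slice, hfind]
        simp only [PySem.Chars.slice]
        rw [PySem.List.slice_to gene.toList (b := PySem.Chars.find gene.toList [':'] + 1) (by omega)]
        congr 1
        omega
      have hiff : PySem.Str.startswith gene p = true ↔
          PySem.Str.slice gene none (some (PySem.Str.find gene ":" + 1)) = p := by
        rw [PySem.Str.startswith_eq, hpq, startswith_colon_key gene.toList q hq hf',
          ← hkeyl, ← hpq, String.toList_inj]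
      simp only [List.foldl_cons]
      by_cases hk : PySem.Str.slice gene none (some (PySem.Str.find gene ":" + 1)) = p
      · rw [if_pos (hiff.mpr hk), ih hps' _, if_pos hf, if_pos hf,
          if_pos (by rw [hk]; simp : List.contains (p :: ps)
            (PySem.Str.slice gene none (some (PySem.Str.find gene ":" + 1))) = true)]
        by_cases hmem : List.contains ps
            (PySem.Str.slice gene none (some (PySem.Str.find gene ":" + 1))) = true
        · rw [if_pos hmem, hk, set_add_idem]
        · rw [if_neg (by simpa using hmem), hk]
      · rw [if_neg (by rw [hiff]; exact hk), ih hps' found, if_pos hf, if_pos hf]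
        have hc : List.contains (p :: ps)
            (PySem.Str.slice gene none (some (PySem.Str.find gene ":" + 1)))
            = List.contains ps (PySem.Str.slice gene none (some (PySem.Str.find gene ":" + 1))) := by
          have hpk : (PySem.Str.slice gene none (some (PySem.Str.find gene ":" + 1)) == p) = false :=
            beq_eq_false_iff_ne.mpr hk
          rw [List.contains_cons, hpk, Bool.false_or]
        rw [hc]

-- ===== VERDICT (by name: the statement is the Claim_ definition above) =====
theorem find_prefixes_in_row_spec : Claim_equal_find_prefixes_in_row := by
  intro s _
  unfold Spec_find_prefixes_in_row find_prefixes_in_row find_prefixes_in_row_alt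
  rw [List.foldl_map]
  apply List.foldl_ext
  intro found part _
  have hcontains : ∀ k, PySem.Set.contains pfxSetB k = List.contains PREFIXES k := by
    intro k; rfl
  rw [inner_fold_eq (PySem.Str.strip part) PREFIXES prefixes_shape found]
  simp only [hcontains]
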